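-- pv_equiv track=rewrite | github.com/xiaohuanlin/Algorithms | Leetcode/3532. Path Existence Queries in a Graph I.py | pathExistenceQueries
-- ===== SOURCE A (Python) =====
-- from typing import List
--
-- class UnionFind:
--     def __init__(self, n):
--         self.root = [i for i in range(n)]
--         self.size = [1 for _ in range(n)]
--
--     def find(self, u):
--         root = u
--         while self.root[root] != root:
--             root = self.root[root]
--
--         while self.root[u] != root:
--             p = self.root[u]
--             self.root[u] = root
--             u = p
--         return root
--
--     def union(self, u, v):
--         r_u = self.find(u)
--         r_v = self.find(v)
--         if self.size[r_u] > self.size[r_v]: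
--             self.root[r_u] = r_v
--             self.size[r_v] += self.size[r_u]
--         else:
--             self.root[r_v] = r_u
--             self.size[r_u] += self.size[r_v]
--
-- def pathExistenceQueries(n: int, nums: List[int], maxDiff: int, queries: List[List[int]]) -> List[bool]:
--     union = UnionFind(n)
--     for i in range(len(nums)-1):
--         if abs(nums[i] - nums[i+1]) <= maxDiff:
--             union.union(i, i+1)
--     res = []
--     for u, v in queries:
--         res.append(union.find(u) == union.find(v))
--     return res
-- ===== SOURCE B (Python) =====
-- def pathExistenceQueries(n, nums, maxDiff, queries):
--     # One linear pass: give every node a group id; nodes i-1,i share a group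
--     # exactly when both are backed by nums and |nums[i]-nums[i-1]| <= maxDiff.
--     group = []
--     gid = 0
--     for i in range(n):
--         if i > 0 and (i >= len(nums) or abs(nums[i] - nums[i - 1]) > maxDiff):
--             gid += 1
--         group.append(gid)
--     return [group[u] == group[v] for u, v in queries]
-- ===== Notes on version B (the rewrite author's own statement) =====
-- stated objective: simpler
-- what changed: Replaces the UnionFind class (find with path compression, union by size) by a single linear pass that assigns each node a group id (incremented whenever consecutive nums differ by more than maxDiff or nums runs out), answering each query by comparing two group ids.
import Mathlib
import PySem

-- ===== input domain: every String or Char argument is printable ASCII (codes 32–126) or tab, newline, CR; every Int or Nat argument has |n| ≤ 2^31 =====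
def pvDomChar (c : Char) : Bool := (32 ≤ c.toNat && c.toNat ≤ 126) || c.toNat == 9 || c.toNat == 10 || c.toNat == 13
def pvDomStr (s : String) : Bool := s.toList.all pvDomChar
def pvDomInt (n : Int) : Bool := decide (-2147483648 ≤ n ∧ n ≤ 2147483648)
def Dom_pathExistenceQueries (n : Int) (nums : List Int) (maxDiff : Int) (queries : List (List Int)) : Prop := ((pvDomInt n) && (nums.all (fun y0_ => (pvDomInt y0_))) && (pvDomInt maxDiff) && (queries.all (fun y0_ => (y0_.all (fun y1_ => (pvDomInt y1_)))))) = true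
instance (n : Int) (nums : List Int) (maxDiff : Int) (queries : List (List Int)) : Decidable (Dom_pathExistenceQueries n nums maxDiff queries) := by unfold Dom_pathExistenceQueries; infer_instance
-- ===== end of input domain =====

-- B replaces A's union-find (find with path compression + union by size) by one linear
-- pass assigning group ids and an O(1) comparison per query; equivalence of the RETURN value is proved.

-- ===== PORT A =====
-- UnionFind.find, first while loop; fuel-bounded (root.length+1 steps always suffice on inputs admitted by Pre_)
def ufFindRoot : Nat → List Int → Int → Int
  | 0, _, r => r
  | fuel+1, root, r =>
    if PySem.List.pyGetD root r 0 = r then r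
    else ufFindRoot fuel root (PySem.List.pyGetD root r 0)

-- UnionFind.find, second while loop (path compression): returns the updated root array
def ufCompress : Nat → List Int → Int → Int → List Int
  | 0, root, _, _ => root
  | fuel+1, root, u, rt =>
    if PySem.List.pyGetD root u 0 = rt then root
    else ufCompress fuel (PySem.List.pySetD root u rt) (PySem.List.pyGetD root u 0) rt

def ufFind (root : List Int) (u : Int) : Int × List Int :=
  let r := ufFindRoot (root.length + 1) root u
  (r, ufCompress (root.length + 1) root u r)

def ufUnion (root : List Int) (size : List Int) (u v : Int) : List Int × List Int :=
  let f1 := ufFind root u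
  let f2 := ufFind f1.2 v
  if PySem.List.pyGetD size f2.1 0 < PySem.List.pyGetD size f1.1 0 then
    (PySem.List.pySetD f2.2 f1.1 f2.1, PySem.List.pySetD size f2.1 (PySem.List.pyGetD size f2.1 0 + PySem.List.pyGetD size f1.1 0))
  else
    (PySem.List.pySetD f2.2 f2.1 f1.1, PySem.List.pySetD size f1.1 (PySem.List.pyGetD size f1.1 0 + PySem.List.pyGetD size f2.1 0))

def pathExistenceQueries (n : Int) (nums : List Int) (maxDiff : Int) (queries : List (List Int)) : List Bool :=
  let st := (PySem.List.pyRange 0 ((nums.length : Int) - 1) 1).foldl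
    (fun (st : List Int × List Int) i =>
      if |PySem.List.pyGetD nums i 0 - PySem.List.pyGetD nums (i+1) 0| ≤ maxDiff
      then ufUnion st.1 st.2 i (i+1) else st)
    (PySem.List.pyRange 0 n 1, (PySem.List.pyRange 0 n 1).map (fun _ => (1:Int)))
  ((queries.foldl (fun (acc : List Bool × List Int) q =>
      match q with
      | [u, v] =>
        let f1 := ufFind acc.2 u
        let f2 := ufFind f1.2 v
        (acc.1 ++ [f1.1 == f2.1], f2.2)
      | _ => acc)  -- Python raises on a query not of length 2; such inputs are outside Pre_
    ([], st.1))).1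

-- ===== PORT B =====
def pathExistenceQueries_alt (n : Int) (nums : List Int) (maxDiff : Int) (queries : List (List Int)) : List Bool :=
  let st := (PySem.List.pyRange 0 n 1).foldl
    (fun (st : List Int × Int) i =>
      let gid := if 0 < i ∧ ((nums.length : Int) ≤ i ∨ maxDiff < |PySem.List.pyGetD nums i 0 - PySem.List.pyGetD nums (i-1) 0|)
                 then st.2 + 1 else st.2
      (st.1 ++ [gid], gid))
    ([], 0)
  queries.map (fun q =>
    match q with
    | [] => false
    | [_] => false
    | [u, v] => PySem.List.pyGetD st.1 u 0 == PySem.List.pyGetD st.1 v 0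
    | _ :: _ :: _ :: _ => false)  -- Python raises on a query not of length 2; such inputs are outside Pre_

-- ===== PRECONDITION & SPEC =====
-- Pre_ admits exactly the inputs on which A returns: every consecutive pair the loop would
-- union must lie inside the union-find's n slots, and every query must be a pair of
-- (possibly negative, Python-style) indices in range.
def Pre_pathExistenceQueries (n : Int) (nums : List Int) (maxDiff : Int) (queries : List (List Int)) : Prop :=
  (∀ i, i < nums.length - 1 → |nums.getD i 0 - nums.getD (i+1) 0| ≤ maxDiff → (i : Int) + 1 < n) ∧
  (∀ q ∈ queries, q.length = 2 ∧ ∀ x ∈ q, -n ≤ x ∧ x < n)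
instance (n : Int) (nums : List Int) (maxDiff : Int) (queries : List (List Int)) : Decidable (Pre_pathExistenceQueries n nums maxDiff queries) := by unfold Pre_pathExistenceQueries; infer_instance

def pvWitness_pathExistenceQueries : Int × List Int × Int × List (List Int) :=
  (4, [1, 2, 10, 11], 1, [[0, 1], [1, 2], [-1, -2]])

def Spec_pathExistenceQueries (n : Int) (nums : List Int) (maxDiff : Int) (queries : List (List Int)) (out : List Bool) : Prop := out = pathExistenceQueries_alt n nums maxDiff queries
instance (n : Int) (nums : List Int) (maxDiff : Int) (queries : List (List Int)) (out : List Bool) : Decidable (Spec_pathExistenceQueries n nums maxDiff queries out) := by unfold Spec_pathExistenceQueries; infer_instance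

-- ===== CLAIM (what is proved, stated in full; the proofs are below) =====
def Claim_equal_pathExistenceQueries : Prop := ∀ (n : Int) (nums : List Int) (maxDiff : Int) (queries : List (List Int)), Dom_pathExistenceQueries n nums maxDiff queries → Pre_pathExistenceQueries n nums maxDiff queries → Spec_pathExistenceQueries n nums maxDiff queries (pathExistenceQueries n nums maxDiff queries)
-- ===== LEMMAS AND PROOFS =====

-- parent-pointer step: what one array lookup of the find loop reads
def stepF (root : List Int) (j : Int) : Int := PySem.List.pyGetD root j 0

-- "following parents from j reaches the fixpoint r in at most B steps"
def Finds (root : List Int) (B : Nat) (j r : Int) : Prop :=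
  ∃ k ≤ B, (stepF root)^[k] j = r ∧ stepF root r = r

-- the union-find invariant: length, closure of entries, and every node finds rep j
def InvR (root : List Int) (N B : Nat) (rep : Int → Int) : Prop :=
  root.length = N ∧
  ∀ j : Int, 0 ≤ j → j < (N : Int) →
    (0 ≤ stepF root j ∧ stepF root j < (N : Int) ∧ Finds root B j (rep j))

-- Python's negative-index normalisation
def nrm (N : Nat) (u : Int) : Int := if u < 0 then u + N else u

def edgeOKb (nums : List Int) (maxDiff : Int) (i : Nat) : Bool :=
  decide (i + 1 < nums.length) && decide (|nums.getD i 0 - nums.getD (i+1) 0| ≤ maxDiff)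

-- connectivity after the first t edges have been offered to the union-find
def conn (nums : List Int) (maxDiff : Int) (t : Nat) (a b : Nat) : Prop :=
  ∀ i : Nat, min a b ≤ i → i < max a b → (i < t ∧ edgeOKb nums maxDiff i = true)

-- B's group id of node j
def gcount (nums : List Int) (maxDiff : Int) (j : Nat) : Int :=
  (((List.range j).countP (fun e => !(edgeOKb nums maxDiff e))) : Int)

theorem iter_fix (root : List Int) (r : Int) (h : stepF root r = r) (k : Nat) :
    (stepF root)^[k] r = r := Function.iterate_fixed h k

theorem finds_uniq (root : List Int) (j r₁ r₂ : Int) (a b : Nat)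
    (h1 : (stepF root)^[a] j = r₁) (f1 : stepF root r₁ = r₁)
    (h2 : (stepF root)^[b] j = r₂) (f2 : stepF root r₂ = r₂) : r₁ = r₂ := by
  rcases le_total a b with h | h
  · obtain ⟨c, rfl⟩ := Nat.exists_eq_add_of_le h
    rw [Nat.add_comm, Function.iterate_add_apply, h1, iter_fix root r₁ f1] at h2
    exact h2
  · obtain ⟨c, rfl⟩ := Nat.exists_eq_add_of_le h
    rw [Nat.add_comm, Function.iterate_add_apply, h2, iter_fix root r₂ f2] at h1
    exact h1.symm

theorem ufFindRoot_eval (root : List Int) (k : Nat) : ∀ (fuel : Nat) (j r : Int),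
    k < fuel → (stepF root)^[k] j = r → stepF root r = r →
    ufFindRoot fuel root j = r := by
  induction k with
  | zero =>
    intro fuel j r hk hit hfix
    match fuel, hk with
    | fuel+1, _ =>
      simp only [Function.iterate_zero, id] at hit
      subst hit
      simp only [stepF] at hfix
      simp [ufFindRoot, hfix]
  | succ k ih =>
    intro fuel j r hk hit hfix
    match fuel, hk with
    | fuel+1, hk =>
      by_cases hj : PySem.List.pyGetD root j 0 = j
      · have : (stepF root) j = j := hj
        rw [Function.iterate_succ_apply, this, iter_fix root j this] at hit
        subst hit
        simp [ufFindRoot, hj]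
      · rw [show ufFindRoot (fuel+1) root j = ufFindRoot fuel root (PySem.List.pyGetD root j 0) by simp [ufFindRoot, hj]]
        exact ih fuel _ r (by omega) (by show (stepF root)^[k] (stepF root j) = r; rw [← Function.iterate_succ_apply]; exact hit) hfix
theorem nrm_range (N : Nat) (u : Int) (h1 : -(N:Int) ≤ u) (h2 : u < N) :
    0 ≤ nrm N u ∧ nrm N u < N ∧ ((nrm N u).toNat : Int) = nrm N u := by
  unfold nrm; split <;> omega

theorem pyGetD_nrm (root : List Int) (N : Nat) (hlen : root.length = N)
    (u : Int) (h1 : -(N:Int) ≤ u) (h2 : u < 0) (d : Int) :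
    PySem.List.pyGetD root u d = PySem.List.pyGetD root (u + N) d := by
  have hk : u = -(((-u).toNat : Nat) : Int) := by omega
  rw [hk, PySem.List.pyGetD_neg_natCast root ((-u).toNat) d (by omega) (by omega)]
  rw [show -↑(-u).toNat + (N:Int) = ((N - (-u).toNat : Nat) : Int) by omega, PySem.List.pyGetD_natCast,
    List.getD_eq_getElem root d (by omega)]
  congr 1
  omega

theorem stepF_nrm (root : List Int) (N : Nat) (hlen : root.length = N)
    (u : Int) (h1 : -(N:Int) ≤ u) (_h2 : u < N) :
    stepF root u = stepF root (nrm N u) := by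
  unfold nrm; split
  · exact pyGetD_nrm root N hlen u h1 (by omega) 0
  · rfl
theorem pySetD_nrm (root : List Int) (N : Nat) (hlen : root.length = N)
    (u : Int) (h1 : -(N:Int) ≤ u) (h2 : u < 0) (v : Int) :
    PySem.List.pySetD root u v = PySem.List.pySetD root (u + N) v := by
  simp only [PySem.List.pySetD, PySem.List.pySet?, PySem.List.pyIdx?]
  rw [if_neg (by omega), if_pos (by omega), if_pos (by omega), if_pos (by omega)]
  have : root.length - (-u).toNat = (u + ↑N).toNat := by omega
  rw [this]

theorem iter_range (root : List Int) (N B : Nat) (rep : Int → Int)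
    (hI : InvR root N B rep) (k : Nat) (j : Int) (h1 : 0 ≤ j) (h2 : j < N) :
    0 ≤ (stepF root)^[k] j ∧ (stepF root)^[k] j < N := by
  induction k generalizing j with
  | zero => exact ⟨h1, h2⟩
  | succ k ih =>
    rw [Function.iterate_succ_apply]
    obtain ⟨hs1, hs2, -⟩ := hI.2 j h1 h2
    exact ih _ hs1 hs2

theorem rep_fix (root : List Int) (N B : Nat) (rep : Int → Int)
    (hI : InvR root N B rep) (j : Int) (h1 : 0 ≤ j) (h2 : j < N) :
    stepF root (rep j) = rep j ∧ 0 ≤ rep j ∧ rep j < N := by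
  obtain ⟨-, -, k, -, hit, hfix⟩ := hI.2 j h1 h2
  refine ⟨hfix, ?_⟩
  rw [← hit]
  exact iter_range root N B rep hI k j h1 h2

theorem fix_rep (root : List Int) (N B : Nat) (rep : Int → Int)
    (hI : InvR root N B rep) (j : Int) (h1 : 0 ≤ j) (h2 : j < N)
    (hfix : stepF root j = j) : rep j = j := by
  obtain ⟨-, -, k, -, hit, hf2⟩ := hI.2 j h1 h2
  rw [iter_fix root j hfix k] at hit
  exact hit.symm

theorem rep_step (root : List Int) (N B : Nat) (rep : Int → Int)
    (hI : InvR root N B rep) (j : Int) (h1 : 0 ≤ j) (h2 : j < N) :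
    rep (stepF root j) = rep j := by
  obtain ⟨hs1, hs2, k, -, hit, hfix⟩ := hI.2 j h1 h2
  obtain ⟨-, -, k', -, hit', hfix'⟩ := hI.2 _ hs1 hs2
  rcases k with _ | k
  · simp only [Function.iterate_zero, id] at hit
    rw [← hit] at hfix
    rw [hfix]
  · rw [Function.iterate_succ_apply] at hit
    exact finds_uniq root (stepF root j) _ _ k' k hit' hfix' hit hfix

theorem findRoot_rep (root : List Int) (N B : Nat) (rep : Int → Int)
    (hI : InvR root N B rep) (hB : B ≤ N) (u : Int) (h1 : -(N:Int) ≤ u) (h2 : u < N) :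
    ufFindRoot (root.length + 1) root u = rep (nrm N u) := by
  have hlen : root.length = N := hI.1
  by_cases hu : 0 ≤ u
  · have hnu : nrm N u = u := by unfold nrm; rw [if_neg (by omega)]
    rw [hnu]
    obtain ⟨-, -, k, hk, hit, hfix⟩ := hI.2 u hu h2
    exact ufFindRoot_eval root k (root.length + 1) u _ (by omega) hit hfix
  · -- negative index: the first lookup already lands on the canonical entry
    have hN1 : 1 ≤ N := by omega
    have hnu1 : 0 ≤ nrm N u ∧ nrm N u < N ∧ ((nrm N u).toNat : Int) = nrm N u :=
      nrm_range N u h1 h2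
    have hstep : stepF root u = stepF root (nrm N u) := stepF_nrm root N hI.1 u h1 h2
    obtain ⟨hs1, hs2, k, hk, hit, hfix⟩ := hI.2 (nrm N u) hnu1.1 hnu1.2.1
    have hne : ¬ (PySem.List.pyGetD root u 0 = u) := by
      have : 0 ≤ stepF root u := by rw [hstep]; exact (hI.2 _ hnu1.1 hnu1.2.1).1
      simp only [stepF] at this
      omega
    rw [show ufFindRoot (root.length + 1) root u
        = ufFindRoot root.length root (PySem.List.pyGetD root u 0) by
      simp [ufFindRoot, hne]]
    rcases k with _ | k
    · simp only [Function.iterate_zero, id] at hit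
      refine ufFindRoot_eval root 0 root.length _ _ (by omega) ?_ (by rw [hit] at hfix ⊢; exact hfix)
      show stepF root u = rep (nrm N u)
      rw [← hit] at hfix ⊢
      rw [hstep]
      exact hfix
    · refine ufFindRoot_eval root k root.length _ _ (by omega) ?_ hfix
      show (stepF root)^[k] (stepF root u) = rep (nrm N u)
      rw [hstep, ← Function.iterate_succ_apply]
      exact hit

theorem nrm_nonneg (N : Nat) (u : Int) (h : 0 ≤ u) : nrm N u = u := by
  unfold nrm; rw [if_neg (by omega)]

theorem stepF_set (root : List Int) (N : Nat) (hlen : root.length = N)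
    (x : Nat) (hx : x < N) (v j : Int) (hj : 0 ≤ j) :
    stepF (PySem.List.pySetD root (x : Int) v) j = if j = (x:Int) then v else stepF root j := by
  unfold stepF
  have hjc : j = ((j.toNat : Nat) : Int) := by omega
  rw [hjc]
  simp only [PySem.List.pySetD_natCast, PySem.List.pyGetD_natCast]
  rw [List.getD_eq_getElem?_getD, List.getD_eq_getElem?_getD, List.getElem?_set]
  by_cases hxj : x = j.toNat
  · rw [if_pos hxj, if_pos (by omega), if_pos (by omega)]
    rfl
  · rw [if_neg hxj, if_neg (by omega)]

theorem write_compress (root : List Int) (N B : Nat) (rep : Int → Int)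
    (hI : InvR root N B rep) (x : Nat) (hx : x < N) (rf : Int) (hrf : rep x = rf) :
    InvR (PySem.List.pySetD root (x : Int) rf) N B rep := by
  have hlen : root.length = N := hI.1
  obtain ⟨hffix, hf1, hf2⟩ := rep_fix root N B rep hI x (by omega) (by omega)
  rw [hrf] at hffix hf1 hf2
  have hstep : ∀ j, 0 ≤ j → stepF (PySem.List.pySetD root (x : Int) rf) j
      = if j = (x:Int) then rf else stepF root j := stepF_set root N hlen x hx rf
  have key : ∀ (k : Nat) (j : Int), 0 ≤ j → j < N → (stepF root)^[k] j = rep j →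
      ∃ k' ≤ k, (stepF (PySem.List.pySetD root (x : Int) rf))^[k'] j = rep j := by
    intro k
    induction k with
    | zero => intro j _ _ hit; exact ⟨0, le_refl _, hit⟩
    | succ k ih =>
      intro j hj1 hj2 hit
      by_cases hjx : j = (x:Int)
      · subst hjx
        refine ⟨1, by omega, ?_⟩
        rw [Function.iterate_one, hstep _ (by omega), if_pos rfl]
        exact hrf.symm
      · obtain ⟨hs1, hs2, -⟩ := hI.2 j hj1 hj2
        have hrs : rep (stepF root j) = rep j := rep_step root N B rep hI j hj1 hj2
        rw [Function.iterate_succ_apply, ← hrs] at hit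
        obtain ⟨k', hk', hit'⟩ := ih (stepF root j) hs1 hs2 hit
        refine ⟨k' + 1, by omega, ?_⟩
        rw [Function.iterate_succ_apply, hstep _ hj1, if_neg hjx, hit', hrs]
  refine ⟨by rw [PySem.List.length_pySetD, hlen], ?_⟩
  intro j hj1 hj2
  obtain ⟨hs1, hs2, k, hk, hit, hfix⟩ := hI.2 j hj1 hj2
  have hrepj := rep_fix root N B rep hI j hj1 hj2
  have hfix' : stepF (PySem.List.pySetD root (x : Int) rf) (rep j) = rep j := by
    rw [hstep _ hrepj.2.1]
    by_cases hrx : rep j = (x:Int)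
    · rw [hrx] at hfix
      have hxx : rep ((x:Int)) = (x:Int) := fix_rep root N B rep hI (x:Int) (by omega) (by omega) hfix
      rw [if_pos hrx, hrx, ← hrf, hxx]
    · rw [if_neg hrx]; exact hfix
  obtain ⟨k', hk', hit'⟩ := key k j hj1 hj2 hit
  refine ⟨?_, ?_, k', by omega, hit', hfix'⟩
  · rw [hstep _ hj1]; split
    · omega
    · exact (hI.2 j hj1 hj2).1
  · rw [hstep _ hj1]; split
    · omega
    · exact (hI.2 j hj1 hj2).2.1

theorem invR_congr (root : List Int) (N B : Nat) (rep rep' : Int → Int)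
    (h : ∀ j, rep j = rep' j) (hI : InvR root N B rep) : InvR root N B rep' := by
  have : rep = rep' := funext h
  rwa [← this]

theorem write_union (root : List Int) (N B : Nat) (rep : Int → Int)
    (hI : InvR root N B rep) (x y : Int)
    (hx1 : 0 ≤ x) (hx2 : x < N) (hy1 : 0 ≤ y) (hy2 : y < N) (hxy : x ≠ y)
    (hfx : stepF root x = x) (hfy : stepF root y = y)
    (hrx : rep x = x) :
    InvR (PySem.List.pySetD root x y) N (B+1) (fun j => if rep j = x then y else rep j) := by
  have hlen : root.length = N := hI.1
  have hxc : x = ((x.toNat : Nat) : Int) := by omega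
  have hstep : ∀ j, 0 ≤ j → stepF (PySem.List.pySetD root x y) j
      = if j = x then y else stepF root j := by
    intro j hj
    rw [hxc]
    exact stepF_set root N hlen x.toNat (by omega) y j hj
  have hfy' : stepF (PySem.List.pySetD root x y) y = y := by
    rw [hstep y hy1, if_neg (Ne.symm hxy)]; exact hfy
  -- class of x now finds y
  have keyB : ∀ (k : Nat) (j : Int), 0 ≤ j → j < N → (stepF root)^[k] j = rep j → rep j = x →
      ∃ k' ≤ k + 1, (stepF (PySem.List.pySetD root x y))^[k'] j = y := by
    intro k
    induction k with
    | zero =>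
      intro j hj1 hj2 hit hjx
      simp only [Function.iterate_zero, id] at hit
      refine ⟨1, by omega, ?_⟩
      rw [Function.iterate_one, hstep j hj1, if_pos (by omega)]
    | succ k ih =>
      intro j hj1 hj2 hit hjx
      by_cases hjeq : j = x
      · refine ⟨1, by omega, ?_⟩
        rw [Function.iterate_one, hstep j hj1, if_pos hjeq]
      · obtain ⟨hs1, hs2, -⟩ := hI.2 j hj1 hj2
        have hrs : rep (stepF root j) = rep j := rep_step root N B rep hI j hj1 hj2
        rw [Function.iterate_succ_apply, ← hrs] at hit
        obtain ⟨k', hk', hit'⟩ := ih (stepF root j) hs1 hs2 hit (by rw [hrs, hjx])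
        refine ⟨k' + 1, by omega, ?_⟩
        rw [Function.iterate_succ_apply, hstep j hj1, if_neg hjeq, hit']
  -- other classes are untouched
  have keyA : ∀ (k : Nat) (j : Int), 0 ≤ j → j < N → (stepF root)^[k] j = rep j → rep j ≠ x →
      (stepF (PySem.List.pySetD root x y))^[k] j = rep j := by
    intro k
    induction k with
    | zero => intro j _ _ hit _; exact hit
    | succ k ih =>
      intro j hj1 hj2 hit hjx
      have hjeq : j ≠ x := by
        intro he; subst he
        rw [iter_fix root j hfx (k+1)] at hit
        exact hjx (by omega)
      obtain ⟨hs1, hs2, -⟩ := hI.2 j hj1 hj2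
      have hrs : rep (stepF root j) = rep j := rep_step root N B rep hI j hj1 hj2
      rw [Function.iterate_succ_apply, ← hrs] at hit
      have := ih (stepF root j) hs1 hs2 hit (by rw [hrs]; exact hjx)
      rw [Function.iterate_succ_apply, hstep j hj1, if_neg hjeq, this, hrs]
  refine ⟨by rw [PySem.List.length_pySetD, hlen], ?_⟩
  intro j hj1 hj2
  obtain ⟨hs1, hs2, k, hk, hit, hfix⟩ := hI.2 j hj1 hj2
  have hrepj := rep_fix root N B rep hI j hj1 hj2
  refine ⟨?_, ?_, ?_⟩
  · rw [hstep j hj1]; split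
    · omega
    · exact (hI.2 j hj1 hj2).1
  · rw [hstep j hj1]; split
    · omega
    · exact (hI.2 j hj1 hj2).2.1
  · by_cases hjx : rep j = x
    · obtain ⟨k', hk', hit'⟩ := keyB k j hj1 hj2 hit hjx
      exact ⟨k', by omega, by simp only [hjx]; exact hit', by simp only [hjx]; exact hfy'⟩
    · refine ⟨k, by omega, ?_, ?_⟩
      · simp only [if_neg hjx]
        exact keyA k j hj1 hj2 hit hjx
      · simp only [if_neg hjx]
        rw [hstep _ hrepj.2.1, if_neg hjx]
        exact hfix

theorem ufCompress_inv (N B : Nat) (rep : Int → Int) :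
    ∀ (fuel : Nat) (root : List Int) (u : Int), InvR root N B rep →
    -(N:Int) ≤ u → u < N →
    InvR (ufCompress fuel root u (rep (nrm N u))) N B rep := by
  intro fuel
  induction fuel with
  | zero => intro root u hI _ _; exact hI
  | succ fuel ih =>
    intro root u hI h1 h2
    have hlen : root.length = N := hI.1
    have hnr := nrm_range N u h1 h2
    by_cases hc : PySem.List.pyGetD root u 0 = rep (nrm N u)
    · rw [show ufCompress (fuel+1) root u (rep (nrm N u)) = root by simp [ufCompress, hc]]
      exact hI
    · rw [show ufCompress (fuel+1) root u (rep (nrm N u))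
          = ufCompress fuel (PySem.List.pySetD root u (rep (nrm N u))) (PySem.List.pyGetD root u 0) (rep (nrm N u)) by
        simp [ufCompress, hc]]
      have hsetn : PySem.List.pySetD root u (rep (nrm N u))
          = PySem.List.pySetD root (nrm N u) (rep (nrm N u)) := by
        unfold nrm; split
        · exact pySetD_nrm root N hlen u h1 (by omega) _
        · rfl
      have hstepn : PySem.List.pyGetD root u 0 = stepF root (nrm N u) := by
        have := stepF_nrm root N hlen u h1 h2
        simpa [stepF] using this
      have hI' : InvR (PySem.List.pySetD root u (rep (nrm N u))) N B rep := by
        rw [hsetn, show nrm N u = (((nrm N u).toNat : Nat) : Int) by omega]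
        exact write_compress root N B rep hI (nrm N u).toNat (by omega) _
          (by rw [show (((nrm N u).toNat : Nat) : Int) = nrm N u by omega])
      obtain ⟨hp1, hp2, -⟩ := hI.2 (nrm N u) hnr.1 hnr.2.1
      have hrp : rep (nrm N (stepF root (nrm N u))) = rep (nrm N u) := by
        rw [nrm_nonneg N _ hp1]
        exact rep_step root N B rep hI (nrm N u) hnr.1 hnr.2.1
      rw [hstepn]
      have := ih (PySem.List.pySetD root u (rep (nrm N u))) (stepF root (nrm N u)) hI' (by omega) (by omega)
      rwa [hrp] at this

theorem ufFind_spec (root : List Int) (N B : Nat) (rep : Int → Int)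
    (hI : InvR root N B rep) (hB : B ≤ N) (u : Int) (h1 : -(N:Int) ≤ u) (h2 : u < N) :
    (ufFind root u).1 = rep (nrm N u) ∧ InvR (ufFind root u).2 N B rep := by
  have hr : ufFindRoot (root.length + 1) root u = rep (nrm N u) :=
    findRoot_rep root N B rep hI hB u h1 h2
  constructor
  · exact hr
  · show InvR (ufCompress (root.length + 1) root u (ufFindRoot (root.length + 1) root u)) N B rep
    rw [hr]
    exact ufCompress_inv N B rep _ root u hI h1 h2

theorem ufUnion_spec (root size : List Int) (N B : Nat) (rep : Int → Int)
    (hI : InvR root N B rep) (hB : B + 1 ≤ N) (u v : Int)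
    (hu1 : 0 ≤ u) (hu2 : u < N) (hv1 : 0 ≤ v) (hv2 : v < N)
    (hne : rep u ≠ rep v) :
    ∃ c, (c = rep u ∨ c = rep v) ∧
      InvR (ufUnion root size u v).1 N (B+1)
        (fun j => if rep j = rep u ∨ rep j = rep v then c else rep j) := by
  obtain ⟨hf1, hI1⟩ := ufFind_spec root N B rep hI (by omega) u (by omega) hu2
  obtain ⟨hf2, hI2⟩ := ufFind_spec (ufFind root u).2 N B rep hI1 (by omega) v (by omega) hv2
  rw [nrm_nonneg N u hu1] at hf1
  rw [nrm_nonneg N v hv1] at hf2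
  have hru := rep_fix (ufFind root u).2 N B rep hI1 u hu1 hu2
  have hrv := rep_fix (ufFind (ufFind root u).2 v).2 N B rep hI2 v hv1 hv2
  have hru2 := rep_fix (ufFind (ufFind root u).2 v).2 N B rep hI2 u hu1 hu2
  have hrru : rep (rep u) = rep u :=
    fix_rep (ufFind (ufFind root u).2 v).2 N B rep hI2 (rep u) hru2.2.1 hru2.2.2 hru2.1
  have hrrv : rep (rep v) = rep v :=
    fix_rep (ufFind (ufFind root u).2 v).2 N B rep hI2 (rep v) hrv.2.1 hrv.2.2 hrv.1
  show ∃ c, _ ∧ InvR (if PySem.List.pyGetD size (ufFind (ufFind root u).2 v).1 0 < PySem.List.pyGetD size (ufFind root u).1 0 then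
    (PySem.List.pySetD (ufFind (ufFind root u).2 v).2 (ufFind root u).1 (ufFind (ufFind root u).2 v).1,
     PySem.List.pySetD size (ufFind (ufFind root u).2 v).1 _) else
    (PySem.List.pySetD (ufFind (ufFind root u).2 v).2 (ufFind (ufFind root u).2 v).1 (ufFind root u).1,
     PySem.List.pySetD size (ufFind root u).1 _)).1 N (B+1) _
  split
  · -- root[r_u] := r_v : x = rep u, y = rep v
    refine ⟨rep v, Or.inr rfl, ?_⟩
    rw [hf1, hf2]
    have hw := write_union (ufFind (ufFind root u).2 v).2 N B rep hI2 (rep u) (rep v)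
      hru2.2.1 hru2.2.2 hrv.2.1 hrv.2.2 hne hru2.1 hrv.1 hrru
    refine invR_congr _ N (B+1) _ _ (fun j => ?_) hw
    by_cases h1 : rep j = rep u
    · rw [if_pos h1, if_pos (Or.inl h1)]
    · by_cases h2 : rep j = rep v
      · rw [if_neg h1, if_pos (Or.inr h2)]; exact h2
      · rw [if_neg h1, if_neg (by tauto)]
  · -- root[r_v] := r_u : x = rep v, y = rep u
    refine ⟨rep u, Or.inl rfl, ?_⟩
    rw [hf1, hf2]
    have hw := write_union (ufFind (ufFind root u).2 v).2 N B rep hI2 (rep v) (rep u)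
      hrv.2.1 hrv.2.2 hru2.2.1 hru2.2.2 (Ne.symm hne) hrv.1 hru2.1 hrrv
    refine invR_congr _ N (B+1) _ _ (fun j => ?_) hw
    by_cases h1 : rep j = rep v
    · rw [if_pos h1, if_pos (Or.inr h1)]
    · by_cases h2 : rep j = rep u
      · rw [if_neg h1, if_pos (Or.inl h2)]; exact h2
      · rw [if_neg h1, if_neg (by tauto)]

theorem conn_zero (nums : List Int) (maxDiff : Int) (a b : Nat) :
    conn nums maxDiff 0 a b ↔ a = b := by
  constructor
  · intro h
    by_contra hne
    exact absurd (h (min a b) (le_refl _) (by omega)).1 (by omega)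
  · intro h; subst h; intro i h1 h2; omega

theorem conn_skip (nums : List Int) (maxDiff : Int) (t a b : Nat)
    (h : edgeOKb nums maxDiff t = false) :
    (conn nums maxDiff (t+1) a b ↔ conn nums maxDiff t a b) := by
  constructor
  · intro hc i h1 h2
    obtain ⟨hlt, hE⟩ := hc i h1 h2
    refine ⟨?_, hE⟩
    rcases Nat.lt_succ_iff_lt_or_eq.mp hlt with h' | h'
    · exact h'
    · subst h'; rw [hE] at h; exact absurd h (by simp)
  · intro hc i h1 h2
    obtain ⟨hlt, hE⟩ := hc i h1 h2
    exact ⟨by omega, hE⟩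

theorem conn_le (nums : List Int) (maxDiff : Int) (t a : Nat)
    (h : conn nums maxDiff t a t) : a ≤ t := by
  by_contra hgt
  exact absurd (h t (by omega) (by omega)).1 (by omega)

theorem conn_succ (nums : List Int) (maxDiff : Int) (t a b : Nat)
    (h : edgeOKb nums maxDiff t = true) :
    (conn nums maxDiff (t+1) a b ↔
      (conn nums maxDiff t a b ∨
       (conn nums maxDiff t a t ∧ b = t+1) ∨
       (a = t+1 ∧ conn nums maxDiff t b t))) := by
  constructor
  · intro hc
    by_cases hab : conn nums maxDiff t a b
    · exact Or.inl hab
    · unfold conn at hab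
      push Not at hab
      obtain ⟨i₀, hi1, hi2, hi3⟩ := hab
      have hi0 : i₀ = t := by
        have := hc i₀ hi1 hi2
        by_cases hlt : i₀ < t
        · exact absurd (hi3 hlt) (by simp [this.2])
        · omega
      rw [hi0] at hi1 hi2
      have hmax : max a b = t + 1 := by
        have h2 := hc (max a b - 1) (by omega) (by omega)
        omega
      rcases Nat.le_total a b with hab2 | hab2
      · refine Or.inr (Or.inl ⟨?_, by omega⟩)
        intro i ha1 ha2
        have := hc i (by omega) (by omega)
        exact ⟨by omega, this.2⟩
      · refine Or.inr (Or.inr ⟨by omega, ?_⟩)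
        intro i ha1 ha2
        have := hc i (by omega) (by omega)
        exact ⟨by omega, this.2⟩
  · intro hc
    rcases hc with hc | ⟨hc, rfl⟩ | ⟨rfl, hc⟩
    · intro i h1 h2
      obtain ⟨hlt, hE⟩ := hc i h1 h2
      exact ⟨by omega, hE⟩
    · have ha := conn_le nums maxDiff t a hc
      intro i h1 h2
      rcases Nat.lt_or_ge i t with h' | h'
      · obtain ⟨-, hE⟩ := hc i (by omega) (by omega)
        exact ⟨by omega, hE⟩
      · have : i = t := by omega
        subst this
        exact ⟨by omega, h⟩
    · have hb := conn_le nums maxDiff t b hc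
      intro i h1 h2
      rcases Nat.lt_or_ge i t with h' | h'
      · obtain ⟨-, hE⟩ := hc i (by omega) (by omega)
        exact ⟨by omega, hE⟩
      · have : i = t := by omega
        subst this
        exact ⟨by omega, h⟩

theorem conn_full (nums : List Int) (maxDiff : Int) (a b : Nat) :
    conn nums maxDiff (nums.length - 1) a b ↔
      ∀ i : Nat, min a b ≤ i → i < max a b → edgeOKb nums maxDiff i = true := by
  constructor
  · intro h i h1 h2; exact (h i h1 h2).2
  · intro h i h1 h2
    have hE := h i h1 h2
    refine ⟨?_, hE⟩
    unfold edgeOKb at hE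
    simp only [Bool.and_eq_true, decide_eq_true_eq] at hE
    omega

theorem gcount_mono_iff (nums : List Int) (maxDiff : Int) (a b : Nat) (hab : a ≤ b) :
    (gcount nums maxDiff a = gcount nums maxDiff b ↔
      ∀ i : Nat, a ≤ i → i < b → edgeOKb nums maxDiff i = true) := by
  unfold gcount
  rw [show b = a + (b - a) by omega, List.range_add, List.countP_append]
  rw [Int.ofNat_inj.symm.symm]
  constructor
  · intro h i h1 h2
    have : ((List.range (b-a)).map (a + ·)).countP (fun e => !(edgeOKb nums maxDiff e)) = 0 := by omega
    rw [List.countP_eq_zero] at this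
    have := this i (by
      refine List.mem_map.mpr ⟨i - a, ?_, by omega⟩
      rw [List.mem_range]; omega)
    simpa using this
  · intro h
    have : ((List.range (b-a)).map (a + ·)).countP (fun e => !(edgeOKb nums maxDiff e)) = 0 := by
      rw [List.countP_eq_zero]
      intro x hx
      obtain ⟨k, hk, rfl⟩ := List.mem_map.mp hx
      rw [List.mem_range] at hk
      simp [h (a + k) (by omega) (by omega)]
    omega

theorem gcount_conn (nums : List Int) (maxDiff : Int) (a b : Nat) :
    (gcount nums maxDiff a = gcount nums maxDiff b ↔
      ∀ i : Nat, min a b ≤ i → i < max a b → edgeOKb nums maxDiff i = true) := by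
  rcases Nat.le_total a b with h | h
  · rw [Nat.min_eq_left h, Nat.max_eq_right h]
    exact gcount_mono_iff nums maxDiff a b h
  · rw [Nat.min_eq_right h, Nat.max_eq_left h, eq_comm]
    exact gcount_mono_iff nums maxDiff b a h

theorem conn_right (nums : List Int) (maxDiff : Int) (t b : Nat)
    (h : conn nums maxDiff t b (t+1)) : b = t + 1 := by
  by_contra hne
  rcases Nat.lt_or_ge b (t+1) with h' | h'
  · exact absurd (h t (by omega) (by omega)).1 (by omega)
  · exact absurd (h (t+1) (by omega) (by omega)).1 (by omega)

theorem conn_refl (nums : List Int) (maxDiff : Int) (t a : Nat) :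
    conn nums maxDiff t a a := by
  intro i h1 h2; omega

def UInv (nums : List Int) (maxDiff : Int) (N t : Nat) (root : List Int) : Prop :=
  ∃ rep B, InvR root N B rep ∧ B ≤ min t (N - 1) ∧
    (∀ a b : Nat, a < N → b < N → (rep a = rep b ↔ conn nums maxDiff t a b))

theorem uloop_inv (n : Int) (nums : List Int) (maxDiff : Int) (N : Nat) (hN : (N:Int) = n)
    (hPre : ∀ i, i < nums.length - 1 → |nums.getD i 0 - nums.getD (i+1) 0| ≤ maxDiff → (i : Int) + 1 < n)
    (T : Nat) (hT : T ≤ nums.length - 1) :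
    UInv nums maxDiff N T
      (((List.range T).map (Nat.cast : Nat → Int)).foldl
        (fun (st : List Int × List Int) i =>
          if |PySem.List.pyGetD nums i 0 - PySem.List.pyGetD nums (i+1) 0| ≤ maxDiff
          then ufUnion st.1 st.2 i (i+1) else st)
        (PySem.List.pyRange 0 n 1, (PySem.List.pyRange 0 n 1).map (fun _ => (1:Int)))).1 := by
  induction T with
  | zero =>
    show UInv nums maxDiff N 0 (PySem.List.pyRange 0 n 1)
    refine ⟨fun j => j, 0, ⟨?_, ?_⟩, by omega, ?_⟩
    · simp [PySem.List.length_pyRange_one]; omega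
    · intro j hj1 hj2
      have hstep : stepF (PySem.List.pyRange 0 n 1) j = j := by
        unfold stepF
        rw [show j = ((j.toNat : Nat) : Int) by omega, PySem.List.pyGetD_natCast,
          List.getD_eq_getElem _ _ (by rw [PySem.List.length_pyRange_one]; omega)]
        rw [PySem.List.getElem_pyRange_one]
        omega
      refine ⟨?_, ?_, 0, by omega, rfl, ?_⟩ <;> rw [hstep] <;> omega
    · intro a b ha hb
      show ((a:Int) = (b:Int)) ↔ _
      rw [conn_zero]
      omega
  | succ T ih =>
    have hT' : T ≤ nums.length - 1 := by omega
    obtain ⟨rep, B, hI, hB, hR⟩ := ih hT'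
    rw [List.range_succ, List.map_append, List.foldl_append]
    simp only [List.map_cons, List.map_nil, List.foldl_cons, List.foldl_nil]
    set st := (((List.range T).map (Nat.cast : Nat → Int)).foldl
        (fun (st : List Int × List Int) i =>
          if |PySem.List.pyGetD nums i 0 - PySem.List.pyGetD nums (i+1) 0| ≤ maxDiff
          then ufUnion st.1 st.2 i (i+1) else st)
        (PySem.List.pyRange 0 n 1, (PySem.List.pyRange 0 n 1).map (fun _ => (1:Int)))) with hst
    have hm : T + 1 < nums.length := by omega
    by_cases hd : |PySem.List.pyGetD nums (T:Int) 0 - PySem.List.pyGetD nums ((T:Int)+1) 0| ≤ maxDiff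
    · -- union of T and T+1
      have hdg : |nums.getD T 0 - nums.getD (T+1) 0| ≤ maxDiff := by
        rw [show ((T:Int)+1) = ((T+1 : Nat) : Int) by push_cast; ring,
          PySem.List.pyGetD_natCast, PySem.List.pyGetD_natCast] at hd
        exact hd
      have hEb : edgeOKb nums maxDiff T = true := by
        unfold edgeOKb
        rw [Bool.and_eq_true, decide_eq_true_eq, decide_eq_true_eq]
        exact ⟨hm, hdg⟩
      have hTN : T + 1 < N := by
        have := hPre T (by omega) hdg
        omega
      have hne : rep (T:Int) ≠ rep ((T:Int)+1) := by
        have := hR T (T+1) (by omega) (by omega)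
        rw [show (((T+1):Nat):Int) = (T:Int)+1 by push_cast; ring] at this
        intro h
        have hc := this.mp h
        exact absurd (hc T (by omega) (by omega)).1 (by omega)
      obtain ⟨c, hc, hIc⟩ := ufUnion_spec st.1 st.2 N B rep hI (by omega) (T:Int) ((T:Int)+1)
        (by omega) (by omega) (by omega) (by omega) hne
      rw [if_pos hd]
      refine ⟨_, B+1, hIc, by omega, ?_⟩
      intro a b ha hb
      have hcast : (((T+1):Nat):Int) = (T:Int)+1 := by push_cast; ring
      rw [conn_succ nums maxDiff T a b hEb]
      -- translate each disjunct through hR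
      have hXa : (rep (a:Int) = rep (T:Int)) ↔ conn nums maxDiff T a T := hR a T ha (by omega)
      have hXb : (rep (b:Int) = rep (T:Int)) ↔ conn nums maxDiff T b T := hR b T hb (by omega)
      have hYa : (rep (a:Int) = rep ((T:Int)+1)) ↔ a = T+1 := by
        rw [← hcast, hR a (T+1) ha hTN]
        constructor
        · exact conn_right nums maxDiff T a
        · intro h; subst h; exact conn_refl nums maxDiff T (T+1)
      have hYb : (rep (b:Int) = rep ((T:Int)+1)) ↔ b = T+1 := by
        rw [← hcast, hR b (T+1) hb hTN]
        constructor
        · exact conn_right nums maxDiff T b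
        · intro h; subst h; exact conn_refl nums maxDiff T (T+1)
      have hab : (rep (a:Int) = rep (b:Int)) ↔ conn nums maxDiff T a b := hR a b ha hb
      have hXY : rep (T:Int) ≠ rep ((T:Int)+1) := hne
      constructor
      · intro h
        by_cases h1 : rep (a:Int) = rep (T:Int) ∨ rep (a:Int) = rep ((T:Int)+1)
        · by_cases h2 : rep (b:Int) = rep (T:Int) ∨ rep (b:Int) = rep ((T:Int)+1)
          · -- both in merged class
            rcases h1 with h1 | h1
            · rcases h2 with h2 | h2
              · exact Or.inl (hab.mp (by rw [h1, h2]))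
              · exact Or.inr (Or.inl ⟨hXa.mp h1, hYb.mp h2⟩)
            · rcases h2 with h2 | h2
              · exact Or.inr (Or.inr ⟨hYa.mp h1, hXb.mp h2⟩)
              · exact Or.inl (hab.mp (by rw [h1, h2]))
          · rw [if_pos h1, if_neg h2] at h
            exact absurd (h ▸ hc) h2
        · by_cases h2 : rep (b:Int) = rep (T:Int) ∨ rep (b:Int) = rep ((T:Int)+1)
          · rw [if_neg h1, if_pos h2] at h
            exact absurd (h.symm ▸ hc) h1
          · rw [if_neg h1, if_neg h2] at h
            exact Or.inl (hab.mp h)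
      · intro h
        rcases h with h | ⟨h1, h2⟩ | ⟨h1, h2⟩
        · by_cases h1 : rep (a:Int) = rep (T:Int) ∨ rep (a:Int) = rep ((T:Int)+1)
          · have h2 : rep (b:Int) = rep (T:Int) ∨ rep (b:Int) = rep ((T:Int)+1) := by
              have := hab.mpr h
              rcases h1 with h1 | h1
              · exact Or.inl (by rw [← this, h1])
              · exact Or.inr (by rw [← this, h1])
            rw [if_pos h1, if_pos h2]
          · have h2 : ¬(rep (b:Int) = rep (T:Int) ∨ rep (b:Int) = rep ((T:Int)+1)) := by
              have := hab.mpr h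
              rw [← this]
              exact h1
            rw [if_neg h1, if_neg h2]
            exact hab.mpr h
        · rw [if_pos (Or.inl (hXa.mpr h1)), if_pos (Or.inr (hYb.mpr h2))]
        · rw [if_pos (Or.inr (hYa.mpr h1)), if_pos (Or.inl (hXb.mpr h2))]
    · rw [if_neg hd]
      refine ⟨rep, B, hI, by omega, ?_⟩
      intro a b ha hb
      have hdg : ¬ |nums.getD T 0 - nums.getD (T+1) 0| ≤ maxDiff := by
        intro hcon
        refine hd ?_
        rw [show ((T:Int)+1) = ((T+1 : Nat) : Int) by push_cast; ring,
          PySem.List.pyGetD_natCast, PySem.List.pyGetD_natCast]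
        exact hcon
      have hEb : edgeOKb nums maxDiff T = false := by
        unfold edgeOKb
        rw [decide_eq_false hdg, Bool.and_false]
      rw [conn_skip nums maxDiff T a b hEb]
      exact hR a b ha hb

theorem qloop_inv (n : Int) (N B : Nat) (hN : (N:Int) = n)
    (rep : Int → Int) (hB : B ≤ N) :
    ∀ (qs : List (List Int)) (acc : List Bool) (root : List Int), InvR root N B rep →
    (∀ q ∈ qs, q.length = 2 ∧ ∀ x ∈ q, -n ≤ x ∧ x < n) →
    (qs.foldl (fun (acc : List Bool × List Int) q =>
      match q with
      | [u, v] =>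
        let f1 := ufFind acc.2 u
        let f2 := ufFind f1.2 v
        (acc.1 ++ [f1.1 == f2.1], f2.2)
      | _ => acc) (acc, root)).1
    = acc ++ qs.map (fun q =>
        match q with
        | [u, v] => rep (nrm N u) == rep (nrm N v)
        | _ => false) := by
  intro qs
  induction qs with
  | nil => intro acc root _ _; simp
  | cons q qs ih =>
    intro acc root hI hq
    obtain ⟨hlen2, hbnd⟩ := hq q (List.mem_cons_self)
    match q, hlen2 with
    | [u, v], _ =>
      simp only [List.foldl_cons, List.map_cons]
      obtain ⟨hu1, hu2⟩ := hbnd u (by simp)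
      obtain ⟨hv1, hv2⟩ := hbnd v (by simp)
      obtain ⟨hf1, hI1⟩ := ufFind_spec root N B rep hI hB u (by omega) (by omega)
      obtain ⟨hf2, hI2⟩ := ufFind_spec (ufFind root u).2 N B rep hI1 hB v (by omega) (by omega)
      rw [show (ufFind root u).1 = rep (nrm N u) from hf1] 
      rw [show (ufFind (ufFind root u).2 v).1 = rep (nrm N v) from hf2]
      rw [ih _ _ hI2 (fun p hp => hq p (List.mem_cons_of_mem _ hp))]
      simp

theorem gcount_succ (nums : List Int) (maxDiff : Int) (s : Nat) :
    gcount nums maxDiff (s+1)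
      = gcount nums maxDiff s + (if edgeOKb nums maxDiff s = true then 0 else 1) := by
  unfold gcount
  rw [List.range_succ, List.countP_append]
  cases h : edgeOKb nums maxDiff s <;> simp [List.countP_cons, h]

theorem bloop_aux (nums : List Int) (maxDiff : Int) (t : Nat) :
    (((List.range t).map (Nat.cast : Nat → Int)).foldl
      (fun (st : List Int × Int) i =>
        let gid := if 0 < i ∧ ((nums.length : Int) ≤ i ∨ maxDiff < |PySem.List.pyGetD nums i 0 - PySem.List.pyGetD nums (i-1) 0|)
                   then st.2 + 1 else st.2
        (st.1 ++ [gid], gid))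
      ([], 0))
    = ((List.range t).map (fun j => gcount nums maxDiff j), gcount nums maxDiff (t - 1)) := by
  induction t with
  | zero => simp [gcount]
  | succ t ih =>
    rw [List.range_succ, List.map_append, List.foldl_append, ih]
    simp only [List.map_cons, List.map_nil, List.foldl_cons, List.foldl_nil]
    have hgid : (if 0 < (t:Int) ∧ ((nums.length : Int) ≤ (t:Int) ∨ maxDiff < |PySem.List.pyGetD nums (t:Int) 0 - PySem.List.pyGetD nums ((t:Int)-1) 0|)
                 then gcount nums maxDiff (t-1) + 1 else gcount nums maxDiff (t-1))
        = gcount nums maxDiff t := by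
      rcases Nat.eq_zero_or_pos t with rfl | ht
      · rw [if_neg (by simp)]
      · have ht1 : (t:Int) - 1 = ((t-1 : Nat) : Int) := by omega
        rw [ht1, PySem.List.pyGetD_natCast, PySem.List.pyGetD_natCast]
        have hsub : t - 1 + 1 = t := by omega
        have hstep := gcount_succ nums maxDiff (t-1)
        rw [hsub] at hstep
        by_cases hE : edgeOKb nums maxDiff (t-1) = true
        · rw [if_neg, hstep, if_pos hE]
          · ring
          · unfold edgeOKb at hE
            rw [Bool.and_eq_true, decide_eq_true_eq, decide_eq_true_eq] at hE
            rw [abs_sub_comm] at hE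
            rw [show nums.getD (t-1+1) 0 = nums.getD t 0 by rw [hsub]] at hE
            rintro ⟨-, hor | hor⟩
            · omega
            · omega
        · rw [if_pos, hstep, if_neg hE]
          unfold edgeOKb at hE
          rw [Bool.and_eq_true, decide_eq_true_eq, decide_eq_true_eq] at hE
          refine ⟨by omega, ?_⟩
          by_cases hlen : t + 1 ≤ nums.length - 1 + 1
          · right
            have : ¬ |nums.getD (t-1) 0 - nums.getD (t-1+1) 0| ≤ maxDiff := fun hb => hE ⟨by omega, hb⟩
            rw [hsub] at this
            rw [abs_sub_comm] at this
            omega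
          · left; omega
    rw [hgid]
    simp

theorem pyRange_cast (b : Int) (N : Nat) (h : b.toNat = N) :
    PySem.List.pyRange 0 b 1 = (List.range N).map (Nat.cast : Nat → Int) := by
  rw [PySem.List.pyRange_one]
  have : (b - 0).toNat = N := by omega
  rw [this]
  exact List.map_congr_left (fun k _ => by omega)

theorem group_get (nums : List Int) (maxDiff : Int) (N : Nat) (u : Int)
    (h1 : -(N:Int) ≤ u) (h2 : u < N) :
    PySem.List.pyGetD ((List.range N).map (fun j => gcount nums maxDiff j)) u 0
      = gcount nums maxDiff (nrm N u).toNat := by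
  have hlen : ((List.range N).map (fun j => gcount nums maxDiff j)).length = N := by simp
  have hnr := nrm_range N u h1 h2
  have hget : PySem.List.pyGetD ((List.range N).map (fun j => gcount nums maxDiff j)) u 0
      = PySem.List.pyGetD ((List.range N).map (fun j => gcount nums maxDiff j)) (nrm N u) 0 := by
    unfold nrm
    split
    · exact pyGetD_nrm _ N hlen u h1 (by omega) 0
    · rfl
  rw [hget, show nrm N u = (((nrm N u).toNat : Nat) : Int) by omega, PySem.List.pyGetD_natCast,
    List.getD_eq_getElem _ _ (by simp; omega)]
  rw [List.getElem_map, List.getElem_range, Int.toNat_natCast]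

theorem main_equiv (n : Int) (nums : List Int) (maxDiff : Int) (queries : List (List Int))
    (hPre1 : ∀ i, i < nums.length - 1 → |nums.getD i 0 - nums.getD (i+1) 0| ≤ maxDiff → (i : Int) + 1 < n)
    (hPre2 : ∀ q ∈ queries, q.length = 2 ∧ ∀ x ∈ q, -n ≤ x ∧ x < n) :
    pathExistenceQueries n nums maxDiff queries = pathExistenceQueries_alt n nums maxDiff queries := by
  rcases queries with _ | ⟨q0, qs⟩
  · rfl
  · obtain ⟨hl2, hbnd⟩ := hPre2 q0 (List.mem_cons_self)
    have hn1 : 1 ≤ n := by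
      match q0, hl2 with
      | [u, v], _ =>
        have := hbnd u (by simp)
        omega
    set N := n.toNat with hNdef
    have hN : (N:Int) = n := by omega
    unfold pathExistenceQueries pathExistenceQueries_alt
    rw [pyRange_cast ((nums.length : Int) - 1) (nums.length - 1) (by omega)]
    obtain ⟨rep, B, hI, hB, hR⟩ := uloop_inv n nums maxDiff N hN hPre1 (nums.length - 1) (le_refl _)
    rw [qloop_inv n N B hN rep (by omega) (q0 :: qs) [] _ hI hPre2]
    rw [pyRange_cast n N (by omega), bloop_aux]
    rw [List.nil_append]
    refine List.map_congr_left (fun q hq => ?_)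
    obtain ⟨hlq, hbq⟩ := hPre2 q hq
    match q, hlq with
    | [u, v], _ =>
      obtain ⟨hu1, hu2⟩ := hbq u (by simp)
      obtain ⟨hv1, hv2⟩ := hbq v (by simp)
      dsimp only
      rw [group_get nums maxDiff N u (by omega) (by omega), group_get nums maxDiff N v (by omega) (by omega)]
      have hnru := nrm_range N u (by omega) (by omega)
      have hnrv := nrm_range N v (by omega) (by omega)
      rw [Bool.eq_iff_iff, beq_iff_eq, beq_iff_eq]
      rw [show nrm N u = (((nrm N u).toNat : Nat) : Int) by omega,
          show nrm N v = (((nrm N v).toNat : Nat) : Int) by omega]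
      rw [hR (nrm N u).toNat (nrm N v).toNat (by omega) (by omega)]
      rw [gcount_conn, conn_full]
      simp only [Int.toNat_natCast]

-- ===== VERDICT (by name: the statement is the Claim_ definition above) =====
theorem pathExistenceQueries_spec : Claim_equal_pathExistenceQueries := by
  intro n nums maxDiff queries _ hPre
  unfold Spec_pathExistenceQueries
  exact main_equiv n nums maxDiff queries hPre.1 hPre.2
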